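-- pv_equiv track=rewrite | github.com/CyrilBaah/incidentIQ | src/documentation_agent.py | _categorize_error_type
-- ===== SOURCE A (Python) =====
-- def _categorize_error_type(root_cause: str) -> str:
--     """Categorize error type from root cause"""
--     root_cause_lower = root_cause.lower()
--
--     if any(term in root_cause_lower for term in ["memory", "leak", "cpu", "high load"]):
--         return "Performance Issues"
--     elif any(term in root_cause_lower for term in ["connection", "timeout", "network"]):
--         return "Connection Issues"
--     elif any(term in root_cause_lower for term in ["deploy", "deployment", "version"]):
--         return "Deployment Issues"
--     elif any(term in root_cause_lower for term in ["database", "db", "query"]):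
--         return "Database Issues"
--     elif any(term in root_cause_lower for term in ["service", "down", "unavailable"]):
--         return "Service Unavailability"
--     else:
--         return "General Service Issues"
-- ===== SOURCE B (Python) =====
-- # Single left-to-right scan over the string: at each position, check which
-- # keyword starts there and keep the best (lowest) category priority seen.
-- KEYWORDS = {
--     "memory": 0, "leak": 0, "cpu": 0, "high load": 0,
--     "connection": 1, "timeout": 1, "network": 1,
--     "deploy": 2, "deployment": 2, "version": 2,
--     "database": 3, "db": 3, "query": 3,
--     "service": 4, "down": 4, "unavailable": 4,
-- }
--
-- CATEGORIES = [
--     "Performance Issues",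
--     "Connection Issues",
--     "Deployment Issues",
--     "Database Issues",
--     "Service Unavailability",
--     "General Service Issues",
-- ]
--
--
-- def _categorize_error_type(root_cause: str) -> str:
--     """Categorize error type from root cause (positional keyword scan)."""
--     s = root_cause.lower()
--     best = 5
--     for i in range(len(s)):
--         for kw, pri in KEYWORDS.items():
--             if pri < best and s.startswith(kw, i):
--                 best = pri
--     return CATEGORIES[best]
-- ===== Notes on version B (the rewrite author's own statement) =====
-- stated objective: alternative
-- what changed: Replaces the five any(substring-in) membership tests with a single left-to-right scan over string positions that checks startswith for each keyword and keeps the minimum category priority seen, then indexes a category table.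
import Mathlib
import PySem

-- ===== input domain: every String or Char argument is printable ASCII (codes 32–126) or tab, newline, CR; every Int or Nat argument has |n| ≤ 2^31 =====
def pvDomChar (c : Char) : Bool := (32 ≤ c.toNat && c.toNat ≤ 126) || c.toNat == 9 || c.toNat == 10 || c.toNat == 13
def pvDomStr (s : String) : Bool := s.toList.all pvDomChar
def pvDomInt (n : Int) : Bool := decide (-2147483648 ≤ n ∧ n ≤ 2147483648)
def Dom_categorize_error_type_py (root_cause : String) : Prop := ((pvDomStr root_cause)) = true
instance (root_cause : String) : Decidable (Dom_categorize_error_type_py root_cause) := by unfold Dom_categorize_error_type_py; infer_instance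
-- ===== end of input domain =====

-- B replaces the five substring-membership tests with one positional scan keeping the minimum matched keyword priority (alternative decomposition, same cost).

-- ===== PORT A =====
def categorize_error_type_py (root_cause : String) : String :=
  let root_cause_lower := PySem.Str.lower root_cause
  if (["memory", "leak", "cpu", "high load"]).any (fun term => PySem.Str.isIn term root_cause_lower) then
    "Performance Issues"
  else if (["connection", "timeout", "network"]).any (fun term => PySem.Str.isIn term root_cause_lower) then
    "Connection Issues"
  else if (["deploy", "deployment", "version"]).any (fun term => PySem.Str.isIn term root_cause_lower) then
    "Deployment Issues"
  else if (["database", "db", "query"]).any (fun term => PySem.Str.isIn term root_cause_lower) then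
    "Database Issues"
  else if (["service", "down", "unavailable"]).any (fun term => PySem.Str.isIn term root_cause_lower) then
    "Service Unavailability"
  else
    "General Service Issues"

-- ===== PORT B =====
def pvKeywords : List (String × Nat) :=
  [ ("memory", 0), ("leak", 0), ("cpu", 0), ("high load", 0),
    ("connection", 1), ("timeout", 1), ("network", 1),
    ("deploy", 2), ("deployment", 2), ("version", 2),
    ("database", 3), ("db", 3), ("query", 3),
    ("service", 4), ("down", 4), ("unavailable", 4) ]

def pvCategories : List String :=
  [ "Performance Issues", "Connection Issues", "Deployment Issues",
    "Database Issues", "Service Unavailability", "General Service Issues" ]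

def categorize_error_type_py_alt (root_cause : String) : String :=
  let s := (PySem.Str.lower root_cause).toList
  let best := (List.range s.length).foldl (fun best i =>
      pvKeywords.foldl (fun best kp =>
        if kp.2 < best && PySem.Chars.startswith (s.drop i) kp.1.toList then kp.2 else best) best) 5
  pvCategories.getD best "General Service Issues"

-- ===== PRECONDITION & SPEC =====
def Spec_categorize_error_type_py (root_cause : String) (out : String) : Prop := out = categorize_error_type_py_alt root_cause
instance (root_cause : String) (out : String) : Decidable (Spec_categorize_error_type_py root_cause out) := by unfold Spec_categorize_error_type_py; infer_instance

-- ===== CLAIM =====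
def Claim_equal_categorize_error_type_py : Prop := ∀ (root_cause : String), Dom_categorize_error_type_py root_cause → Spec_categorize_error_type_py root_cause (categorize_error_type_py root_cause)

-- ===== LEMMAS AND PROOFS =====

-- generic "keep the minimum value among matched elements" fold
def pvMinFold {α : Type} (pred : α → Bool) (val : α → Nat) (L : List α) (b : Nat) : Nat :=
  L.foldl (fun b x => if val x < b && pred x then val x else b) b

-- the flattened pairs the double loop of B visits
def pvFlat (n : Nat) : List (Nat × (String × Nat)) :=
  (List.range n).flatMap (fun i => pvKeywords.map (fun kp => (i, kp)))

lemma pvMinFold_le_init {α : Type} (pred : α → Bool) (val : α → Nat) (L : List α) (b : Nat) :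
    pvMinFold pred val L b ≤ b := by
  induction L generalizing b with
  | nil => simp [pvMinFold]
  | cons x t ih =>
    simp only [pvMinFold, List.foldl_cons]
    split_ifs with h
    · exact le_trans (ih _) (by simp only [Bool.and_eq_true, decide_eq_true_eq] at h; omega)
    · exact ih _

lemma pvMinFold_le_of_mem {α : Type} (pred : α → Bool) (val : α → Nat) (L : List α) (b : Nat)
    (x : α) (hx : x ∈ L) (hp : pred x = true) :
    pvMinFold pred val L b ≤ val x := by
  induction L generalizing b with
  | nil => simp at hx
  | cons y t ih =>
    simp only [pvMinFold, List.foldl_cons]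
    rcases List.mem_cons.mp hx with rfl | hx'
    · split_ifs with h
      · exact pvMinFold_le_init _ _ _ _
      · simp only [hp, Bool.and_true, decide_eq_true_eq, not_lt] at h
        exact le_trans (pvMinFold_le_init _ _ _ _) h
    · split_ifs with h <;> exact ih _ hx'

lemma pvMinFold_cases {α : Type} (pred : α → Bool) (val : α → Nat) (L : List α) (b : Nat) :
    pvMinFold pred val L b = b ∨ ∃ x ∈ L, pred x = true ∧ pvMinFold pred val L b = val x := by
  induction L generalizing b with
  | nil => simp [pvMinFold]
  | cons y t ih =>
    simp only [pvMinFold, List.foldl_cons]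
    split_ifs with h
    · rcases ih (val y) with h1 | ⟨x, hx, hp, he⟩
      · exact Or.inr ⟨y, List.mem_cons_self, (Bool.and_eq_true _ _ ▸ h).2, h1⟩
      · exact Or.inr ⟨x, List.mem_cons_of_mem _ hx, hp, he⟩
    · rcases ih b with h1 | ⟨x, hx, hp, he⟩
      · exact Or.inl h1
      · exact Or.inr ⟨x, List.mem_cons_of_mem _ hx, hp, he⟩

-- B's double loop is the min-fold over the flattened pair list
lemma pvDouble_eq_minFold (s : List Char) (l : List Nat) (b : Nat) :
    l.foldl (fun best i =>
      pvKeywords.foldl (fun best kp =>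
        if kp.2 < best && PySem.Chars.startswith (s.drop i) kp.1.toList then kp.2 else best) best) b
    = pvMinFold (fun x => PySem.Chars.startswith (s.drop x.1) x.2.1.toList) (fun x => x.2.2)
        (l.flatMap (fun i => pvKeywords.map (fun kp => (i, kp)))) b := by
  induction l generalizing b with
  | nil => simp [pvMinFold]
  | cons i t ih =>
    simp only [List.foldl_cons, List.flatMap_cons, pvMinFold, List.foldl_append, List.foldl_map]
    exact ih _

-- a keyword is a substring of s iff it starts at some scanned position
lemma pvMatch_iff (kw : List Char) (hk : kw ≠ []) (s : List Char) :
    (∃ i < s.length, PySem.Chars.startswith (s.drop i) kw = true) ↔ PySem.Chars.isIn kw s = true := by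
  constructor
  · rintro ⟨i, _, hp⟩
    exact (PySem.Chars.exists_prefix_drop_iff_isIn _ _).mp ⟨i, (PySem.Chars.startswith_iff _ _).mp hp⟩
  · intro h
    obtain ⟨j, hj⟩ := (PySem.Chars.exists_prefix_drop_iff_isIn _ _).mpr h
    refine ⟨j, ?_, (PySem.Chars.startswith_iff _ _).mpr hj⟩
    by_contra hn
    rw [List.drop_eq_nil_of_le (by omega)] at hj
    exact hk (List.prefix_nil.mp hj)

-- characterization of B's best value
lemma pvBest_eq (s : List Char) (k : Nat) (hk : k ≤ 5)
    (hmatch : k < 5 → ∃ kp ∈ pvKeywords, kp.2 = k ∧ PySem.Chars.isIn kp.1.toList s = true)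
    (hlow : ∀ kp ∈ pvKeywords, PySem.Chars.isIn kp.1.toList s = true → k ≤ kp.2) :
    (List.range s.length).foldl (fun best i =>
      pvKeywords.foldl (fun best kp =>
        if kp.2 < best && PySem.Chars.startswith (s.drop i) kp.1.toList then kp.2 else best) best) 5 = k := by
  rw [pvDouble_eq_minFold]
  have hknil : ∀ kp ∈ pvKeywords, kp.1.toList ≠ [] := by decide
  -- lower bound
  have hlb : k ≤ pvMinFold (fun x => PySem.Chars.startswith (s.drop x.1) x.2.1.toList) (fun x => x.2.2)
      ((List.range s.length).flatMap (fun i => pvKeywords.map (fun kp => (i, kp)))) 5 := by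
    rcases pvMinFold_cases (fun x => PySem.Chars.startswith (s.drop x.1) x.2.1.toList) (fun x => x.2.2)
      ((List.range s.length).flatMap (fun i => pvKeywords.map (fun kp => (i, kp)))) 5 with he | ⟨x, hx, hp, he⟩
    · omega
    · rw [he]
      simp only [List.mem_flatMap, List.mem_map, List.mem_range] at hx
      obtain ⟨i, hi, kp, hkp, rfl⟩ := hx
      exact hlow kp hkp ((pvMatch_iff _ (hknil kp hkp) s).mp ⟨i, hi, hp⟩)
  -- upper bound
  rcases Nat.lt_or_ge k 5 with hk5 | hk5
  · obtain ⟨kp, hkp, hval, hin⟩ := hmatch hk5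
    obtain ⟨i, hi, hp⟩ := (pvMatch_iff _ (hknil kp hkp) s).mpr hin
    have hub := pvMinFold_le_of_mem (fun x => PySem.Chars.startswith (s.drop x.1) x.2.1.toList)
      (fun x => x.2.2) ((List.range s.length).flatMap (fun i => pvKeywords.map (fun kp => (i, kp)))) 5
      (i, kp) (by simp only [List.mem_flatMap, List.mem_map, List.mem_range]; exact ⟨i, hi, kp, hkp, rfl⟩) hp
    simp only at hub
    omega
  · have := pvMinFold_le_init (fun x => PySem.Chars.startswith (s.drop x.1) x.2.1.toList) (fun x => x.2.2)
      ((List.range s.length).flatMap (fun i => pvKeywords.map (fun kp => (i, kp)))) 5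
    omega

-- ===== VERDICT =====
theorem categorize_error_type_py_spec : Claim_equal_categorize_error_type_py := by
  intro root_cause _
  unfold Spec_categorize_error_type_py categorize_error_type_py categorize_error_type_py_alt
  simp only [List.any_cons, List.any_nil, Bool.or_false, Bool.or_eq_true, PySem.Str.isIn_eq]
  set s := (PySem.Str.lower root_cause).toList with hs
  split_ifs with h0 h1 h2 h3 h4
  · rw [pvBest_eq s 0 (by omega) ?hm ?hl]
    · rfl
    case hm =>
      intro _
      rcases h0 with h|h|h|h
      exacts [⟨("memory",0), by decide, rfl, h⟩, ⟨("leak",0), by decide, rfl, h⟩, ⟨("cpu",0), by decide, rfl, h⟩, ⟨("high load",0), by decide, rfl, h⟩]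
    case hl => intro kp hkp _; omega
  · rw [pvBest_eq s 1 (by omega) ?hm ?hl]
    · rfl
    case hm =>
      intro _
      rcases h1 with h|h|h
      exacts [⟨("connection",1), by decide, rfl, h⟩, ⟨("timeout",1), by decide, rfl, h⟩, ⟨("network",1), by decide, rfl, h⟩]
    case hl => intro kp hkp hin; fin_cases hkp <;> simp_all
  · rw [pvBest_eq s 2 (by omega) ?hm ?hl]
    · rfl
    case hm =>
      intro _
      rcases h2 with h|h|h
      exacts [⟨("deploy",2), by decide, rfl, h⟩, ⟨("deployment",2), by decide, rfl, h⟩, ⟨("version",2), by decide, rfl, h⟩]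
    case hl => intro kp hkp hin; fin_cases hkp <;> simp_all
  · rw [pvBest_eq s 3 (by omega) ?hm ?hl]
    · rfl
    case hm =>
      intro _
      rcases h3 with h|h|h
      exacts [⟨("database",3), by decide, rfl, h⟩, ⟨("db",3), by decide, rfl, h⟩, ⟨("query",3), by decide, rfl, h⟩]
    case hl => intro kp hkp hin; fin_cases hkp <;> simp_all
  · rw [pvBest_eq s 4 (by omega) ?hm ?hl]
    · rfl
    case hm =>
      intro _
      rcases h4 with h|h|h
      exacts [⟨("service",4), by decide, rfl, h⟩, ⟨("down",4), by decide, rfl, h⟩, ⟨("unavailable",4), by decide, rfl, h⟩]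
    case hl => intro kp hkp hin; fin_cases hkp <;> simp_all
  · rw [pvBest_eq s 5 (by omega) (by omega) ?hl]
    · rfl
    case hl => intro kp hkp hin; fin_cases hkp <;> simp_all
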